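-- pv_equiv track=rewrite | github.com/gadivadarp/FDS | prac1cricket.py | neither_cricket_nor_badminton
-- ===== SOURCE A (Python) =====
-- def remove_duplicates(lst):
--     unique_list = []
--     for item in lst:
--         if item not in unique_list:
--             unique_list.append(item)
--     return unique_list
--
-- def neither_cricket_nor_badminton(total_students, cricket_list, badminton_list):
--     students_playing_cricket_or_badminton = cricket_list + badminton_list
--     students_playing_cricket_or_badminton = remove_duplicates(students_playing_cricket_or_badminton)
--     neither = []
--     for student in total_students:
--         if student not in students_playing_cricket_or_badminton:
--             neither.append(student)
--     return neither
-- ===== SOURCE B (Python) =====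
-- def neither_cricket_nor_badminton(total_students, cricket_list, badminton_list):
--     neither = list(total_students)
--     for player in cricket_list + badminton_list:
--         while player in neither:
--             neither.remove(player)
--     return neither
-- ===== Notes on version B (the rewrite author's own statement) =====
-- stated objective: alternative
-- what changed: Instead of filtering total_students by membership in a de-duplicated union, B starts from a copy of total_students and loops over the exclusion lists, repeatedly removing each excluded value from the candidate list in place, which preserves the order of the survivors.
import Mathlib
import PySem

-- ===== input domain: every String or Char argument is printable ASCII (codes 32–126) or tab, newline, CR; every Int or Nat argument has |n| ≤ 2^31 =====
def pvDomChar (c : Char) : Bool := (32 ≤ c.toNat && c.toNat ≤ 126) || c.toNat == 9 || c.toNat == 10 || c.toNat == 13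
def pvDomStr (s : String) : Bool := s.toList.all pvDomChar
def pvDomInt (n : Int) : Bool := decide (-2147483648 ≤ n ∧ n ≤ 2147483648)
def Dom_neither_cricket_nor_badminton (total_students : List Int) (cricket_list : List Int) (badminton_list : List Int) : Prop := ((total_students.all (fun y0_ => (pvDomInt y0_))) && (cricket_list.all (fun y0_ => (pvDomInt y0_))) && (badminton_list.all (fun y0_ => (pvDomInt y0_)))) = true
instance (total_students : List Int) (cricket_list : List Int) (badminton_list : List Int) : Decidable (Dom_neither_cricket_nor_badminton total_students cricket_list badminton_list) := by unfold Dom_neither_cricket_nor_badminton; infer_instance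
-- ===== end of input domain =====

-- B replaces A's dedup-union-then-filter with in-place deletion: it copies total_students and
-- repeatedly removes each excluded value from that copy; objective: alternative (not faster).


-- ===== PORT A =====
-- helper of A: builds the de-duplicated list exactly as the Python loop does
def remove_duplicates (lst : List Int) : List Int :=
  lst.foldl (fun unique_list item =>
    if item ∈ unique_list then unique_list else unique_list ++ [item]) []

def neither_cricket_nor_badminton (total_students : List Int) (cricket_list : List Int) (badminton_list : List Int) : List Int :=
  let students_playing_cricket_or_badminton := cricket_list ++ badminton_list
  let students_playing_cricket_or_badminton := remove_duplicates students_playing_cricket_or_badminton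
  total_students.foldl (fun neither student =>
    if student ∈ students_playing_cricket_or_badminton then neither else neither ++ [student]) []

-- ===== PORT B =====
-- B's inner `while player in neither: neither.remove(player)` (list.remove = erase first occurrence)
def removeWhile (player : Int) (neither : List Int) : List Int :=
  if h : player ∈ neither then removeWhile player (neither.erase player) else neither
termination_by neither.length
decreasing_by
  have hp := List.length_pos_of_mem h
  rw [List.length_erase_of_mem h]; omega

-- B: copy total_students, then for each player of cricket_list + badminton_list delete it from the copy
def neither_cricket_nor_badminton_alt (total_students : List Int) (cricket_list : List Int) (badminton_list : List Int) : List Int :=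
  (cricket_list ++ badminton_list).foldl
    (fun neither player => removeWhile player neither) total_students

-- ===== PRECONDITION & SPEC =====
def Spec_neither_cricket_nor_badminton (total_students : List Int) (cricket_list : List Int) (badminton_list : List Int) (out : List Int) : Prop := out = neither_cricket_nor_badminton_alt total_students cricket_list badminton_list
instance (total_students : List Int) (cricket_list : List Int) (badminton_list : List Int) (out : List Int) : Decidable (Spec_neither_cricket_nor_badminton total_students cricket_list badminton_list out) := by unfold Spec_neither_cricket_nor_badminton; infer_instance

-- ===== CLAIM (what is proved, stated in full; the proofs are below) =====
def Claim_equal_neither_cricket_nor_badminton : Prop := ∀ (total_students : List Int) (cricket_list : List Int) (badminton_list : List Int), Dom_neither_cricket_nor_badminton total_students cricket_list badminton_list → Spec_neither_cricket_nor_badminton total_students cricket_list badminton_list (neither_cricket_nor_badminton total_students cricket_list badminton_list)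

-- ===== LEMMAS AND PROOFS =====

-- membership in the dedup loop's accumulator
theorem mem_remove_duplicates_aux (l : List Int) (acc : List Int) (x : Int) :
    x ∈ l.foldl (fun u i => if i ∈ u then u else u ++ [i]) acc ↔ x ∈ acc ∨ x ∈ l := by
  induction l generalizing acc with
  | nil => simp
  | cons h t ih =>
    simp only [List.foldl_cons]
    split_ifs with hm
    · rw [ih]
      constructor
      · rintro (ha | ht)
        · exact Or.inl ha
        · exact Or.inr (List.mem_cons_of_mem _ ht)
      · rintro (ha | ht)
        · exact Or.inl ha
        · rcases List.mem_cons.mp ht with rfl | ht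
          · exact Or.inl hm
          · exact Or.inr ht
    · rw [ih]
      simp only [List.mem_append, List.mem_cons]
      tauto

theorem mem_remove_duplicates (l : List Int) (x : Int) :
    x ∈ remove_duplicates l ↔ x ∈ l := by
  unfold remove_duplicates; rw [mem_remove_duplicates_aux]; simp

-- A's accumulate-if-not-member loop is a filter
theorem filter_loop_aux (t : List Int) (p : Int → Prop) [DecidablePred p] (acc : List Int) :
    t.foldl (fun out s => if p s then out else out ++ [s]) acc
      = acc ++ t.filter (fun s => decide (¬ p s)) := by
  induction t generalizing acc with
  | nil => simp
  | cons h tl ih =>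
    simp only [List.foldl_cons, List.filter_cons]
    by_cases hp : p h
    · simp [hp, ih]
    · simp [hp, ih]

theorem filter_loop_eq (t : List Int) (good : List Int) :
    t.foldl (fun out s => if s ∈ good then out else out ++ [s]) []
      = t.filter (fun s => decide (s ∉ good)) := by
  simpa using filter_loop_aux t (fun s => s ∈ good) []

-- erasing one occurrence of x does not change the x-free sublist
theorem filter_erase_ne (x : Int) (l : List Int) :
    (l.erase x).filter (fun y => decide (y ≠ x)) = l.filter (fun y => decide (y ≠ x)) := by
  induction l with
  | nil => simp
  | cons h t ih =>
    by_cases hx : h = x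
    · subst hx; simp
    · have he : (h :: t).erase x = h :: t.erase x := by simp [hx]
      rw [he, List.filter_cons, List.filter_cons, ih]

-- B's while-loop removes every occurrence of x
theorem removeWhile_eq_filter (x : Int) (l : List Int) :
    removeWhile x l = l.filter (fun y => decide (y ≠ x)) := by
  induction hn : l.length using Nat.strong_induction_on generalizing l with
  | _ n ih =>
    rw [removeWhile]
    split_ifs with h
    · have hlen : (l.erase x).length < n := by
        have := List.length_pos_of_mem h
        rw [List.length_erase_of_mem h]; omega
      rw [ih _ hlen _ rfl, filter_erase_ne]
    · exact (List.filter_eq_self.mpr (fun a ha => by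
        simp only [decide_eq_true_eq]; exact fun hax => h (hax ▸ ha))).symm

-- B's outer loop filters out everything in the exclusion list
theorem foldl_removeWhile (e : List Int) (t : List Int) :
    e.foldl (fun neither player => removeWhile player neither) t
      = t.filter (fun s => decide (s ∉ e)) := by
  induction e generalizing t with
  | nil => simp
  | cons x e ih =>
    simp only [List.foldl_cons]
    rw [removeWhile_eq_filter, ih, List.filter_filter]
    apply List.filter_congr
    intro a _
    by_cases h1 : a = x <;> by_cases h2 : a ∈ e <;> simp [h1, h2]

-- ===== VERDICT (by name: the statement is the Claim_ definition above) =====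
theorem neither_cricket_nor_badminton_spec : Claim_equal_neither_cricket_nor_badminton := by
  intro t c b _
  show _ = _
  unfold neither_cricket_nor_badminton neither_cricket_nor_badminton_alt
  simp only []
  rw [filter_loop_eq, foldl_removeWhile]
  apply List.filter_congr
  intro x _
  simp [mem_remove_duplicates]
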